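-- pv_equiv track=rewrite | github.com/EchuCompa/Cursos-Python | Ejercicio 3 Scrabble.py | mayor_puntaje
-- ===== SOURCE A (Python) =====
-- def valor_pala(pala):
--     valor = 0
--     for j in range(len(pala)):
--             z = pala[j]
--             if z in ['e','a', 'i', 'n', 'r', 't','o', 'l','u']:
--                 valor += 1
--             if z in [ 'd',  'g']:
--                 valor += 2
--             if z in ['b','c','m','p']:
--                 valor +=3
--             if z in ['f','h','v','w','y']:
--                 valor += 4
--             if z in ["k"]:
--                 valor +=5
--             if z in ['j','x', 'ñ']:
--                 valor +=8
--             if z in ['q','z']: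
--                 valor +=10
--     return valor
--
-- def mayor_puntaje(palabras):
--     valores = []
--     holus = 0
--     for x in range(len(palabras)):
--         valores.append(valor_pala(palabras[x]))
--     if len(palabras)>0 :
--         holus = palabras[valores.index(max(valores))]
--     return holus
-- ===== SOURCE B (Python) =====
-- LETTER_SCORES = {'e': 1, 'a': 1, 'i': 1, 'n': 1, 'r': 1, 't': 1, 'o': 1, 'l': 1, 'u': 1,
--                  'd': 2, 'g': 2,
--                  'b': 3, 'c': 3, 'm': 3, 'p': 3,
--                  'f': 4, 'h': 4, 'v': 4, 'w': 4, 'y': 4,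
--                  'k': 5,
--                  'j': 8, 'x': 8, 'ñ': 8,
--                  'q': 10, 'z': 10}
--
--
-- def mayor_puntaje(palabras):
--     best, result = -1, 0
--     for p in palabras:
--         v = sum(LETTER_SCORES.get(c, 0) for c in p)
--         if v > best:
--             best, result = v, p
--     return result
-- ===== Notes on version B (the rewrite author's own statement) =====
-- stated objective: simpler
-- what changed: Single pass that tracks the best word and best score directly (strict > keeps the first maximal word), scoring each letter with one dict lookup, instead of building a parallel score list, rescanning it with max() and list.index(), and testing each character against seven lists.
-- outside the precondition, e.g. on mayor_puntaje([]): A returns 0, B returns 0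
import Mathlib
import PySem

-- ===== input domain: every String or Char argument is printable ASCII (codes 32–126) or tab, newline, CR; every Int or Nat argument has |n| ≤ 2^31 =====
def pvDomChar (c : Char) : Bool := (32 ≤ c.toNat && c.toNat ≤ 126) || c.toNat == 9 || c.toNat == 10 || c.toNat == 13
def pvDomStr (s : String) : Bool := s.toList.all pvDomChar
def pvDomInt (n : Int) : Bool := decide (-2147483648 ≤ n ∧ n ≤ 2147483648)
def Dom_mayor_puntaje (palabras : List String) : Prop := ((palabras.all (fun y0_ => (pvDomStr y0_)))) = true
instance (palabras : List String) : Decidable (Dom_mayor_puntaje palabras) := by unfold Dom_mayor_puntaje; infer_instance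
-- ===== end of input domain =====

-- B replaces A's parallel score list plus the max()/list.index() re-scans by a single pass
-- that tracks the best word and score directly (simpler); the equivalence is about the
-- return value on non-empty input (on [] the Python A returns the int 0, not a string).

-- ===== PORT A =====
-- one letter-group test of A's if-chain: 'if z in [...]: valor += pts'
def grp (letters : List Char) (pts : Int) (valor : Int) (z : Char) : Int :=
  if z ∈ letters then valor + pts else valor

-- loop body of valor_pala: A's seven if-statements, in order
def aStep (valor : Int) (z : Char) : Int :=
  let valor := grp ['e', 'a', 'i', 'n', 'r', 't', 'o', 'l', 'u'] 1 valor z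
  let valor := grp ['d', 'g'] 2 valor z
  let valor := grp ['b', 'c', 'm', 'p'] 3 valor z
  let valor := grp ['f', 'h', 'v', 'w', 'y'] 4 valor z
  let valor := grp ['k'] 5 valor z
  let valor := grp ['j', 'x', 'ñ'] 8 valor z
  let valor := grp ['q', 'z'] 10 valor z
  valor

def valor_pala (pala : String) : Int :=
  pala.toList.foldl aStep 0

def mayor_puntaje (palabras : List String) : String :=
  let valores := palabras.foldl (fun acc x => acc ++ [valor_pala x]) []
  if palabras.length > 0 then
    match PySem.List.max? valores (fun v => v) with
    | some m =>
      match PySem.List.index? valores m with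
      | some i => (PySem.List.pyGet? palabras (i : Int)).getD ""
      | none => ""  -- unreachable: max? returns an element of valores
    | none => ""    -- unreachable: valores ≠ [] in this branch
  else ""           -- the Python returns the int 0 here (not a string); excluded by Pre_

-- ===== PORT B =====
-- the dict literal LETTER_SCORES (all keys distinct)
def letterScores : PySem.Dict Char Int :=
  PySem.Dict.mk [('e', 1), ('a', 1), ('i', 1), ('n', 1), ('r', 1), ('t', 1), ('o', 1), ('l', 1), ('u', 1),
                 ('d', 2), ('g', 2),
                 ('b', 3), ('c', 3), ('m', 3), ('p', 3),
                 ('f', 4), ('h', 4), ('v', 4), ('w', 4), ('y', 4),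
                 ('k', 5),
                 ('j', 8), ('x', 8), ('ñ', 8),
                 ('q', 10), ('z', 10)]

-- sum(LETTER_SCORES.get(c, 0) for c in p)
def wordScore (p : String) : Int :=
  (p.toList.map (fun c => letterScores.getD c 0)).sum

def mayor_puntaje_alt (palabras : List String) : String :=
  -- the Python initialises result = 0, an int sentinel only returned on the empty list
  -- (outside Pre_); "" stands in for it in the String-typed port
  (palabras.foldl (fun acc p =>
    let v := wordScore p
    if v > acc.1 then (v, p) else acc) ((-1 : Int), "")).2

-- ===== PRECONDITION & SPEC =====
-- Pre_ excludes only the empty list, on which both Pythons return the int 0, which is not a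
-- value of the declared String result type.
def Pre_mayor_puntaje (palabras : List String) : Prop := palabras ≠ []
instance (palabras : List String) : Decidable (Pre_mayor_puntaje palabras) := by
  unfold Pre_mayor_puntaje; infer_instance

def pvWitness_mayor_puntaje : List String := ["casa", "perro", "kiwi"]

def Spec_mayor_puntaje (palabras : List String) (out : String) : Prop := out = mayor_puntaje_alt palabras
instance (palabras : List String) (out : String) : Decidable (Spec_mayor_puntaje palabras out) := by unfold Spec_mayor_puntaje; infer_instance

-- ===== CLAIM (what is proved, stated in full; the proofs are below) =====
def Claim_equal_mayor_puntaje : Prop := ∀ (palabras : List String), Dom_mayor_puntaje palabras → Pre_mayor_puntaje palabras → Spec_mayor_puntaje palabras (mayor_puntaje palabras)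

-- ===== LEMMAS AND PROOFS =====

theorem grp_shift (L : List Char) (p v : Int) (z : Char) : grp L p v z = v + grp L p 0 z := by
  unfold grp; by_cases h : z ∈ L <;> simp [h]

theorem grp_nonneg (L : List Char) (p : Int) (hp : 0 ≤ p) (v : Int) (hv : 0 ≤ v) (z : Char) :
    0 ≤ grp L p v z := by
  unfold grp; by_cases h : z ∈ L <;> simp [h] <;> omega

theorem aStep_shift (v : Int) (z : Char) : aStep v z = v + aStep 0 z := by
  simp only [aStep]
  rw [grp_shift _ _ (grp _ _ _ _), grp_shift _ _ (grp _ _ _ _), grp_shift _ _ (grp _ _ _ _),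
    grp_shift _ _ (grp _ _ _ _), grp_shift _ _ (grp _ _ _ _), grp_shift _ _ (grp _ _ _ _),
    grp_shift _ _ v]
  conv_rhs => rw [grp_shift _ _ (grp _ _ _ _), grp_shift _ _ (grp _ _ _ _),
    grp_shift _ _ (grp _ _ _ _), grp_shift _ _ (grp _ _ _ _), grp_shift _ _ (grp _ _ _ _),
    grp_shift _ _ (grp _ _ _ _)]
  ring

theorem aStep_zero_nonneg (z : Char) : 0 ≤ aStep 0 z := by
  simp only [aStep]
  refine grp_nonneg _ _ (by norm_num) _ (grp_nonneg _ _ (by norm_num) _ (grp_nonneg _ _ (by norm_num) _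
    (grp_nonneg _ _ (by norm_num) _ (grp_nonneg _ _ (by norm_num) _ (grp_nonneg _ _ (by norm_num) _
    (grp_nonneg _ _ (by norm_num) _ le_rfl z) z) z) z) z) z) z

theorem aStep_zero_eq (z : Char) : aStep 0 z = letterScores.getD z 0 := by
  by_cases hz : z ∈ ['e', 'a', 'i', 'n', 'r', 't', 'o', 'l', 'u', 'd', 'g', 'b', 'c', 'm',
      'p', 'f', 'h', 'v', 'w', 'y', 'k', 'j', 'x', 'ñ', 'q', 'z']
  · fin_cases hz <;> decide
  · simp only [List.mem_cons, List.not_mem_nil, or_false, not_or] at hz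
    obtain ⟨h1, h2, h3, h4, h5, h6, h7, h8, h9, h10, h11, h12, h13, h14, h15, h16, h17, h18,
      h19, h20, h21, h22, h23, h24, h25, h26⟩ := hz
    simp [aStep, grp, letterScores, PySem.Dict.getD_eq_get?_getD, h1, h2, h3, h4, h5, h6, h7,
      h8, h9, h10, h11, h12, h13, h14, h15, h16, h17, h18, h19, h20, h21, h22, h23, h24, h25,
      h26, Ne.symm, PySem.Dict.get?]

theorem foldl_aStep (l : List Char) (v : Int) :
    l.foldl aStep v = v + (l.map (fun c => letterScores.getD c 0)).sum := by
  induction l generalizing v with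
  | nil => simp
  | cons c t ih =>
    rw [List.foldl_cons, ih, aStep_shift v c, aStep_zero_eq c]
    simp; ring
theorem valor_eq_wordScore (p : String) : valor_pala p = wordScore p := by
  simp [valor_pala, wordScore, foldl_aStep]
theorem wordScore_nonneg (p : String) : 0 ≤ wordScore p := by
  apply List.sum_nonneg
  intro x hx
  simp only [List.mem_map] at hx
  obtain ⟨c, _, rfl⟩ := hx
  rw [← aStep_zero_eq]
  exact aStep_zero_nonneg c
theorem foldl_append_scores (l : List String) (acc : List Int) :
    l.foldl (fun a x => a ++ [valor_pala x]) acc = acc ++ l.map valor_pala := by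
  induction l generalizing acc with
  | nil => simp
  | cons w t ih => simp [ih]

def IsFirstMax (l : List String) (r : String) : Prop :=
  ∃ pre suf, l = pre ++ r :: suf ∧ (∀ x ∈ pre, wordScore x < wordScore r) ∧
    (∀ x ∈ suf, wordScore x ≤ wordScore r)

theorem firstMax_asym (l : List String) (r1 r2 : String)
    (pre1 suf1 pre2 suf2 : List String)
    (hd1 : l = pre1 ++ r1 :: suf1) (hd2 : l = pre2 ++ r2 :: suf2)
    (hp2 : ∀ x ∈ pre2, wordScore x < wordScore r2)
    (hs1 : ∀ x ∈ suf1, wordScore x ≤ wordScore r1)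
    (hlt : pre1.length < pre2.length) : False := by
  have hlen2 : pre2.length < l.length := by rw [hd2]; simp
  have hlen1 : pre1.length < l.length := lt_trans hlt hlen2
  have e1 : l[pre1.length]'hlen1 = r1 := by
    rw [List.getElem_of_eq hd1, List.getElem_append_right (Nat.le_refl _)]
    simp
  have m1 : l[pre1.length]'hlen1 ∈ pre2 := by
    rw [List.getElem_of_eq hd2, List.getElem_append_left hlt]
    exact List.getElem_mem _
  have e2 : l[pre2.length]'hlen2 = r2 := by
    rw [List.getElem_of_eq hd2, List.getElem_append_right (Nat.le_refl _)]
    simp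
  have m2 : l[pre2.length]'hlen2 ∈ suf1 := by
    rw [List.getElem_of_eq hd1, List.getElem_append_right (by omega), List.getElem_cons]
    rw [dif_neg (by omega)]
    exact List.getElem_mem _
  rw [e1] at m1
  rw [e2] at m2
  have q1 : wordScore r1 < wordScore r2 := hp2 r1 m1
  have q2 : wordScore r2 ≤ wordScore r1 := hs1 r2 m2
  omega

theorem firstMax_unique (l : List String) (r1 r2 : String)
    (h1 : IsFirstMax l r1) (h2 : IsFirstMax l r2) : r1 = r2 := by
  obtain ⟨pre1, suf1, hd1, hp1, hs1⟩ := h1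
  obtain ⟨pre2, suf2, hd2, hp2, hs2⟩ := h2
  rcases lt_trichotomy pre1.length pre2.length with hlt | heq | hgt
  · exact (firstMax_asym l r1 r2 pre1 suf1 pre2 suf2 hd1 hd2 hp2 hs1 hlt).elim
  · obtain ⟨-, h⟩ := List.append_inj (hd1 ▸ hd2 : pre1 ++ r1 :: suf1 = pre2 ++ r2 :: suf2) heq
    exact (List.cons.injEq _ _ _ _ ▸ h).1
  · exact (firstMax_asym l r2 r1 pre2 suf2 pre1 suf1 hd2 hd1 hp1 hs2 hgt).elim

theorem A_firstMax (l : List String) (hl : l ≠ []) : IsFirstMax l (mayor_puntaje l) := by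
  obtain ⟨w, t, rfl⟩ := List.exists_cons_of_ne_nil hl
  have hmap : (w :: t).map valor_pala = (w :: t).map wordScore :=
    List.map_congr_left (fun x _ => valor_eq_wordScore x)
  unfold mayor_puntaje
  rw [foldl_append_scores, List.nil_append, hmap]
  rw [if_pos (by simp)]
  have hmax? : PySem.List.max? ((w :: t).map wordScore) (fun v => v)
      = some ((t.map wordScore).foldl max (wordScore w)) := by
    rw [List.map_cons, PySem.List.max?_id_cons]
  rw [hmax?]
  set M := (t.map wordScore).foldl max (wordScore w) with hMdef
  have hmem : M ∈ (w :: t).map wordScore := PySem.List.max?_mem hmax?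
  have hmax : ∀ y ∈ (w :: t).map wordScore, y ≤ M := by
    intro y hy
    exact PySem.List.max?_isMax hmax? y hy
  obtain ⟨k, hk⟩ := Option.isSome_iff_exists.1
    (((PySem.List.index?_isSome_iff ((w :: t).map wordScore) M)).2 hmem)
  show IsFirstMax (w :: t)
    (match PySem.List.index? (List.map wordScore (w :: t)) M with
    | some i => (PySem.List.pyGet? (w :: t) (i : Int)).getD ""
    | none => "")
  rw [hk]
  obtain ⟨preV, sufV, hdec, hklen, hnotmem⟩ := (PySem.List.index?_eq_some_iff _ _ _).1 hk
  obtain ⟨pre, rest, hsplit, hpreV, hrest⟩ := List.map_eq_append_iff.1 hdec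
  obtain ⟨r, suf, hrest2, hfr, hsufV⟩ := List.map_eq_cons_iff.1 hrest
  subst hrest2
  rw [hsplit]
  have hkpre : (k : Int) = (pre.length : Int) := by
    rw [← hklen, ← hpreV]; simp
  show IsFirstMax (pre ++ r :: suf) ((PySem.List.pyGet? (pre ++ r :: suf) (k : Int)).getD "")
  rw [hkpre, PySem.List.pyGet?_append_length]
  show IsFirstMax (pre ++ r :: suf) r
  refine ⟨pre, suf, rfl, ?_, ?_⟩
  · intro x hx
    have hne : wordScore x ≠ M := by
      intro he; exact hnotmem (he ▸ (hpreV ▸ List.mem_map_of_mem hx))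
    have hxl : x ∈ w :: t := by rw [hsplit]; exact List.mem_append.2 (Or.inl hx)
    have hle : wordScore x ≤ M := hmax _ (List.mem_map_of_mem hxl)
    rw [hfr]
    omega
  · intro x hx
    have hxl : x ∈ w :: t := by
      rw [hsplit]; exact List.mem_append.2 (Or.inr (List.mem_cons_of_mem _ hx))
    rw [hfr]
    exact hmax _ (List.mem_map_of_mem hxl)

theorem B_gen (t : List String) (w : String) :
    IsFirstMax (w :: t)
      ((t.foldl (fun acc p => let v := wordScore p; if v > acc.1 then (v, p) else acc)
        (wordScore w, w)).2) := by
  induction t generalizing w with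
  | nil => exact ⟨[], [], rfl, by simp, by simp⟩
  | cons p t' ih =>
    rw [List.foldl_cons]
    show IsFirstMax (w :: p :: t')
      ((t'.foldl (fun acc p => let v := wordScore p; if v > acc.1 then (v, p) else acc)
        (if wordScore p > wordScore w then (wordScore p, p) else (wordScore w, w))).2)
    by_cases hpw : wordScore p > wordScore w
    · rw [if_pos hpw]
      obtain ⟨pre, suf, hdec, hpre, hsuf⟩ := ih p
      have hple : wordScore p ≤ wordScore
          ((t'.foldl (fun acc p => let v := wordScore p; if v > acc.1 then (v, p) else acc)
            (wordScore p, p)).2) := by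
        cases pre with
        | nil =>
          rw [List.nil_append] at hdec
          injection hdec with h1 _
          rw [← h1]
        | cons q pre' =>
          rw [List.cons_append] at hdec
          injection hdec with h1 _
          have := hpre q (by simp)
          rw [← h1] at this
          exact le_of_lt this
      refine ⟨w :: pre, suf, by rw [hdec, List.cons_append], ?_, hsuf⟩
      intro x hx
      rcases List.mem_cons.1 hx with rfl | hx
      · omega
      · exact hpre x hx
    · rw [if_neg hpw]
      obtain ⟨pre, suf, hdec, hpre, hsuf⟩ := ih w
      cases pre with
      | nil =>
        rw [List.nil_append] at hdec
        injection hdec with hw' hsuf'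
        refine ⟨[], p :: t', by rw [List.nil_append, ← hw'], by simp, ?_⟩
        intro x hx
        rcases List.mem_cons.1 hx with rfl | hx
        · rw [← hw']; omega
        · exact hsuf x (hsuf' ▸ hx)
      | cons q pre' =>
        rw [List.cons_append] at hdec
        injection hdec with hq' ht'
        refine ⟨w :: p :: pre', suf, by simp only [List.cons_append]; rw [← ht'], ?_, hsuf⟩
        intro x hx
        have hwlt := hpre q (by simp)
        rw [← hq'] at hwlt
        rcases List.mem_cons.1 hx with rfl | hx
        · exact hwlt
        rcases List.mem_cons.1 hx with rfl | hx
        · omega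
        · exact hpre x (by simp [hx])

theorem B_firstMax (l : List String) (hl : l ≠ []) : IsFirstMax l (mayor_puntaje_alt l) := by
  obtain ⟨w, t, rfl⟩ := List.exists_cons_of_ne_nil hl
  unfold mayor_puntaje_alt
  rw [List.foldl_cons]
  show IsFirstMax (w :: t)
    ((t.foldl (fun acc p => let v := wordScore p; if v > acc.1 then (v, p) else acc)
      (if wordScore w > (-1 : Int) then (wordScore w, w) else ((-1 : Int), ""))).2)
  rw [if_pos (by have := wordScore_nonneg w; omega)]
  exact B_gen t w


-- ===== VERDICT (by name: the statement is the Claim_ definition above) =====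
theorem mayor_puntaje_spec : Claim_equal_mayor_puntaje := by
  intro palabras _ hpre
  unfold Spec_mayor_puntaje
  exact firstMax_unique palabras _ _ (A_firstMax palabras hpre) (B_firstMax palabras hpre)
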